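-- pv_equiv track=rewrite | github.com/meg63/Trabajo-2-Wordle | WORDLE/wordle.py | diccionario_palabra
-- ===== SOURCE A (Python) =====
-- def diccionario_palabra(palabra):
--     """ Devolver el diccionario de una palabra [letra]:(indices)"""
--     dic={}
--     for e in range(len(palabra)):
--         if palabra[e] in dic:
--             dic[palabra[e]].add(e)
--         else:
--             dic[palabra[e]] = set()
--             dic[palabra[e]].add(e)
--     return dic
-- ===== SOURCE B (Python) =====
-- def diccionario_palabra(palabra):
--     """ Devolver el diccionario de una palabra [letra]:(indices)"""
--     return {letra: {i for i, c in enumerate(palabra) if c == letra}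
--             for letra in dict.fromkeys(palabra)}
-- ===== Notes on version B (the rewrite author's own statement) =====
-- stated objective: idiomatic
-- what changed: Replaces the single index loop that mutates a dict of sets with a dict comprehension over the distinct letters (dict.fromkeys), rebuilding each letter's index set by a filtering scan of enumerate(palabra).
import Mathlib
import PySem

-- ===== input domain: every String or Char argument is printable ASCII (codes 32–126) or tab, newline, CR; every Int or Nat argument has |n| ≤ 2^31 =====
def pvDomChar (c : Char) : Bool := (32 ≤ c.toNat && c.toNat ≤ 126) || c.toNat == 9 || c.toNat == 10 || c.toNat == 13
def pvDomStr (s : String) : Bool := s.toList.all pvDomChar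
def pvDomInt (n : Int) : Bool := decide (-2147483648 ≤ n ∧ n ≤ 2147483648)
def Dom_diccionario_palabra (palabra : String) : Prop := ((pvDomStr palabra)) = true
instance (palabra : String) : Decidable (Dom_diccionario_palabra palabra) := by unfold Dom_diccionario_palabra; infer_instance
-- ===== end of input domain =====

-- B replaces A's single mutating index loop by a dict comprehension over the distinct
-- letters, each index set rebuilt by a filtering scan of enumerate (objective: idiomatic).


-- ===== PORT A =====
-- for e in range(len(palabra)): if palabra[e] in dic: dic[palabra[e]].add(e)
--                               else: dic[palabra[e]] = set(); dic[palabra[e]].add(e)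
-- e is always in range here, so pyGetD's default ' ' is never used.
def diccionario_palabra (palabra : String) : List (String × List Int) :=
  ((PySem.List.pyRange 0 (PySem.Str.len palabra) 1).foldl
    (fun dic e =>
      let letra := String.ofList [PySem.List.pyGetD palabra.toList e ' ']
      if dic.contains letra then
        dic.modify letra [] (fun s => PySem.Set.add s e)
      else
        dic.insert letra (PySem.Set.add (PySem.Set.ofList []) e))
    PySem.Dict.empty).items

-- ===== PORT B =====
-- {letra: {i for i, c in enumerate(palabra) if c == letra} for letra in dict.fromkeys(palabra)}
def diccionario_palabra_alt (palabra : String) : List (String × List Int) :=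
  (PySem.List.dedup palabra.toList).map (fun letra =>
    (String.ofList [letra],
     PySem.Set.ofList
       (((PySem.List.enumerate palabra.toList 0).filter (fun p => p.2 == letra)).map (·.1))))

-- ===== PRECONDITION & SPEC =====
def Spec_diccionario_palabra (palabra : String) (out : List (String × List Int)) : Prop := out = diccionario_palabra_alt palabra
instance (palabra : String) (out : List (String × List Int)) : Decidable (Spec_diccionario_palabra palabra out) := by unfold Spec_diccionario_palabra; infer_instance

-- ===== CLAIM (what is proved, stated in full; the proofs are below) =====
def Claim_equal_diccionario_palabra : Prop := ∀ (palabra : String), Dom_diccionario_palabra palabra → Spec_diccionario_palabra palabra (diccionario_palabra palabra)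

-- ===== LEMMAS AND PROOFS =====

-- A's loop body, as a function of the pair (index, letter).
def pvStep (dic : PySem.Dict String (List Int)) (p : Int × Char) : PySem.Dict String (List Int) :=
  let letra := String.ofList [p.2]
  if dic.contains letra then
    dic.modify letra [] (fun s => PySem.Set.add s p.1)
  else
    dic.insert letra (PySem.Set.add (PySem.Set.ofList []) p.1)

-- B's index list for one letter.
def pvIdx (cs : List Char) (c : Char) : List Int :=
  ((PySem.List.enumerate cs 0).filter (fun p => p.2 == c)).map (·.1)

lemma pvKeyInj : Function.Injective (fun c : Char => String.ofList [c]) := by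
  intro a b h
  have := congrArg String.toList h
  simpa using this

lemma pvIdx_mem_lt (cs : List Char) (c : Char) (i : Int) (h : i ∈ pvIdx cs c) :
    i < (cs.length : Int) := by
  unfold pvIdx at h
  simp only [List.mem_map, List.mem_filter] at h
  obtain ⟨p, ⟨hp, -⟩, rfl⟩ := h
  rw [PySem.List.mem_enumerate_iff] at hp
  obtain ⟨k, hk, rfl⟩ := hp
  simpa using hk

lemma pvIdx_append (cs : List Char) (c x : Char) :
    pvIdx (cs ++ [c]) x = pvIdx cs x ++ (if c = x then [(cs.length : Int)] else []) := by
  unfold pvIdx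
  rw [PySem.List.enumerate_append, List.filter_append, List.map_append]
  congr 1
  simp [PySem.List.enumerate_cons]
  split_ifs with h
  · simp [h]
  · simp [h]

lemma pvIdx_nil_of_not_mem (cs : List Char) (c : Char) (h : c ∉ cs) : pvIdx cs c = [] := by
  unfold pvIdx
  rw [List.map_eq_nil_iff, List.filter_eq_nil_iff]
  intro p hp
  rw [PySem.List.mem_enumerate_iff] at hp
  obtain ⟨k, hk, rfl⟩ := hp
  simp only [beq_iff_eq]
  intro hcc
  exact h (hcc ▸ List.getElem_mem hk)

lemma pvIdx_nodup (cs : List Char) (c : Char) : (pvIdx cs c).Nodup := by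
  unfold pvIdx
  refine List.Pairwise.imp ne_of_lt ?_
  exact ((PySem.List.pairwise_lt_enumerate cs 0).filter _).map _ (fun _ _ h => h)

-- The invariant of A's loop: after folding over enumerate cs, the dict's items are
-- exactly B's comprehension over the distinct letters of cs.
lemma pvFold_items (cs : List Char) :
    ((PySem.List.enumerate cs 0).foldl pvStep PySem.Dict.empty).items
      = (PySem.List.dedup cs).map (fun c => (String.ofList [c], pvIdx cs c)) := by
  induction cs using List.reverseRecOn with
  | nil => rfl
  | append_singleton cs c ih =>
    rw [PySem.List.enumerate_append, List.foldl_append]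
    simp only [PySem.List.enumerate_cons, PySem.List.enumerate_nil, List.foldl_cons,
      List.foldl_nil, Int.zero_add]
    set d := (PySem.List.enumerate cs 0).foldl pvStep PySem.Dict.empty with hd
    have hkeys : d.keys = (PySem.List.dedup cs).map (fun c => String.ofList [c]) := by
      show d.items.map (·.1) = _
      rw [ih, List.map_map]; rfl
    have hnd : d.keys.Nodup := by
      rw [hkeys, PySem.List.dedup_eq_ofList]
      exact (PySem.Set.nodup_ofList cs).map pvKeyInj
    have hcont : ∀ x : Char, d.contains (String.ofList [x]) = decide (x ∈ cs) := by
      intro x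
      rw [PySem.Dict.contains_eq_decide_mem_keys, hkeys]
      simp only [List.mem_map, PySem.List.dedup_eq_ofList]
      congr 1
      simp only [eq_iff_iff]
      constructor
      · rintro ⟨y, hy, hxy⟩
        exact (PySem.Set.mem_ofList cs x).mp (pvKeyInj hxy ▸ hy)
      · intro hx
        exact ⟨x, (PySem.Set.mem_ofList cs x).mpr hx, rfl⟩
    have hgetD : ∀ x : Char, x ∈ cs → d.getD (String.ofList [x]) [] = pvIdx cs x := by
      intro x hx
      refine PySem.Dict.getD_of_mem_items d ?_ hnd []
      rw [ih]
      have hxd : x ∈ PySem.List.dedup cs := by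
        rw [PySem.List.dedup_eq_ofList, PySem.Set.mem_ofList]
        exact hx
      exact List.mem_map_of_mem hxd
    by_cases hc : c ∈ cs
    · -- existing letter: modify appends the new index
      have hstep : pvStep d ((cs.length : Int), c)
          = d.modify (String.ofList [c]) [] (fun s => PySem.Set.add s (cs.length : Int)) := by
        unfold pvStep
        simp [hcont c, hc]
      rw [hstep]
      have hkeysm : (d.modify (String.ofList [c]) [] (fun s => PySem.Set.add s (cs.length : Int))).keys = d.keys := by
        rw [PySem.Dict.keys_modify, PySem.Dict.keys_insert_of_contains]
        rw [hcont c]; simpa using hc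
      rw [PySem.Dict.items_eq_map_keys _ (hkeysm ▸ hnd) [], hkeysm, hkeys,
        PySem.List.dedup_eq_ofList]
      have hdednew : PySem.List.dedup (cs ++ [c]) = PySem.Set.ofList cs := by
        rw [PySem.List.dedup_eq_ofList, PySem.Set.ofList_append_singleton,
          PySem.Set.add_of_mem ((PySem.Set.mem_ofList cs c).mpr hc)]
      rw [hdednew, List.map_map]
      refine List.map_congr_left ?_
      intro x hx
      have hxcs : x ∈ cs := (PySem.Set.mem_ofList cs x).mp hx
      simp only [Function.comp_apply, PySem.Dict.getD_modify, Prod.mk.injEq, true_and]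
      rw [pvIdx_append]
      by_cases hxc : x = c
      · subst hxc
        rw [if_pos rfl, if_pos rfl, hgetD x hxcs,
          PySem.Set.add_of_not_mem (fun h => absurd (pvIdx_mem_lt cs x _ h) (by simp))]
      · rw [if_neg (fun h => hxc (pvKeyInj h)), if_neg (fun h => hxc h.symm),
          hgetD x hxcs, List.append_nil]
    · -- new letter: insert appends a fresh entry at the end
      have hstep : pvStep d ((cs.length : Int), c)
          = d.insert (String.ofList [c]) (PySem.Set.add (PySem.Set.ofList []) (cs.length : Int)) := by
        unfold pvStep
        simp [hcont c, hc]
      rw [hstep, PySem.Dict.items_insert_of_not_contains _ _ (by rw [hcont c]; simpa using hc), ih]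
      have hdednew : PySem.List.dedup (cs ++ [c]) = PySem.List.dedup cs ++ [c] := by
        rw [PySem.List.dedup_eq_ofList, PySem.List.dedup_eq_ofList,
          PySem.Set.ofList_append_singleton,
          PySem.Set.add_of_not_mem (fun h => hc ((PySem.Set.mem_ofList cs c).mp h))]
      rw [hdednew, List.map_append]
      congr 1
      · refine List.map_congr_left ?_
        intro x hx
        have hxcs : x ∈ cs := by
          have hx' := hx
          rw [PySem.List.dedup_eq_ofList, PySem.Set.mem_ofList] at hx'
          exact hx'
        have hxc : c ≠ x := fun h => hc (by rw [h]; exact hxcs)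
        rw [pvIdx_append, if_neg hxc, List.append_nil]
      · simp only [List.map_cons, List.map_nil]
        rw [pvIdx_append, if_pos rfl, pvIdx_nil_of_not_mem cs c hc, List.nil_append]
        rfl

-- ===== VERDICT (by name: the statement is the Claim_ definition above) =====
theorem diccionario_palabra_spec : Claim_equal_diccionario_palabra := by
  intro palabra _
  unfold Spec_diccionario_palabra diccionario_palabra diccionario_palabra_alt
  have hA : (PySem.List.pyRange 0 (PySem.Str.len palabra) 1).foldl
      (fun dic e =>
        let letra := String.ofList [PySem.List.pyGetD palabra.toList e ' ']
        if dic.contains letra then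
          dic.modify letra [] (fun s => PySem.Set.add s e)
        else
          dic.insert letra (PySem.Set.add (PySem.Set.ofList []) e))
      PySem.Dict.empty
      = (PySem.List.enumerate palabra.toList 0).foldl pvStep PySem.Dict.empty := by
    rw [PySem.Str.len_eq, ← PySem.List.len_eq,
      PySem.List.enumerate_eq_map_pyRange palabra.toList ' ', List.foldl_map]
    rfl
  rw [hA, pvFold_items]
  refine (List.map_congr_left ?_).symm
  intro c _
  show (String.ofList [c], PySem.Set.ofList (pvIdx palabra.toList c)) = _
  exact congrArg (Prod.mk (String.ofList [c]))
    (PySem.Set.ofList_eq_self_of_nodup _ (pvIdx_nodup palabra.toList c))
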